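-- pv_equiv track=rewrite | github.com/kkr1947/lead-seperator | seperate.py | email_extract
-- ===== SOURCE A (Python) =====
-- def email_extract(st):
--     li = st.split(',')
--
--
--     ls = [match for match in li if "@" in match]
--     if len(ls):
--         ls = ls[0]
--         return ls
--     else:
--         return ("")
-- ===== SOURCE B (Python) =====
-- def email_extract(st):
--     # Single streaming pass: track the current field and whether it holds '@';
--     # return as soon as that field ends, never building the list of fields.
--     field = []
--     seen = False
--     for ch in st:
--         if ch == ',':
--             if seen:
--                 return ''.join(field)
--             field = []
--             seen = False
--         else:
--             field.append(ch)
--             if ch == '@':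
--                 seen = True
--     return ''.join(field) if seen else ""
-- ===== Notes on version B (the rewrite author's own statement) =====
-- stated objective: alternative
-- what changed: Replaces split-into-all-fields + filter + index with a single character-level streaming scan that keeps only the current field and a marker-seen flag and returns early when that field ends.
import Mathlib
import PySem

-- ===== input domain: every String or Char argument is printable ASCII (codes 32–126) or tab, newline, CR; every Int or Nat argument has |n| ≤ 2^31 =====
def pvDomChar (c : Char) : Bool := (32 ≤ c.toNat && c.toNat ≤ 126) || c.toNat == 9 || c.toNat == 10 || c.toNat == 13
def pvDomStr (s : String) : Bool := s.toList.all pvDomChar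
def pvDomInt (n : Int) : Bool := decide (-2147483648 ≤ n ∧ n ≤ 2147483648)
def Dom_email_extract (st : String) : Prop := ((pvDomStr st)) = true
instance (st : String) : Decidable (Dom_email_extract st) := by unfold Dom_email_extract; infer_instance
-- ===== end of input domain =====

-- B replaces split-all-fields + filter + index by ONE streaming scan with an early return (alternative decomposition).

-- ===== PORT A =====
-- li = st.split(','); ls = [m for m in li if "@" in m]; return ls[0] if len(ls) else ""
def email_extract (st : String) : String :=
  let li := PySem.Chars.splitOn st.toList [',']
  let ls := li.filter (fun m => PySem.Chars.isIn ['@'] m)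
  if ls.length ≠ 0 then String.ofList (ls.headD []) else ""

-- ===== PORT B =====
-- the loop of Source B: current field chars + '@'-seen flag, early return at a comma
def emailScan : List Char → List Char → Bool → List Char
  | [], field, seen => if seen then field else []
  | c :: rest, field, seen =>
    if c = ',' then
      if seen then field else emailScan rest [] false
    else
      emailScan rest (field ++ [c]) (if c = '@' then true else seen)

def email_extract_alt (st : String) : String :=
  String.ofList (emailScan st.toList [] false)

-- ===== PRECONDITION & SPEC =====
def Spec_email_extract (st : String) (out : String) : Prop := out = email_extract_alt st
instance (st : String) (out : String) : Decidable (Spec_email_extract st out) := by unfold Spec_email_extract; infer_instance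

-- ===== CLAIM (what is proved, stated in full; the proofs are below) =====
def Claim_equal_email_extract : Prop := ∀ (st : String), Dom_email_extract st → Spec_email_extract st (email_extract st)

-- ===== LEMMAS AND PROOFS =====

-- the comma-fields of l, the first one prefixed by cur (reference shape for both ports)
def pvFields (cur : List Char) : List Char → List (List Char)
  | [] => [cur]
  | c :: rest => if c = ',' then cur :: pvFields [] rest else pvFields (cur ++ [c]) rest

theorem splitOn_go_eq (fuel : Nat) : ∀ (l cur : List Char) (acc : List (List Char)),
    l.length ≤ fuel →
    PySem.Chars.splitOn.go [','] fuel l cur acc = acc.reverse ++ pvFields cur.reverse l := by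
  induction fuel with
  | zero =>
    intro l cur acc h
    have hl : l = [] := List.eq_nil_of_length_eq_zero (Nat.le_zero.mp h)
    subst hl
    rw [PySem.Chars.splitOn.go.eq_def]
    simp [pvFields]
  | succ n ih =>
    intro l cur acc h
    cases l with
    | nil =>
      rw [PySem.Chars.splitOn.go.eq_def]
      simp [pvFields]
    | cons c rest =>
      rw [PySem.Chars.splitOn.go.eq_def]
      by_cases hc : c = ','
      · subst hc
        have hp : List.isPrefixOf [','] (',' :: rest) = true := by
          simp [List.isPrefixOf]
        simp only [hp]
        have := ih rest [] (cur.reverse :: acc) (by simpa using Nat.le_of_succ_le_succ h)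
        simpa [pvFields] using this
      · have hp : List.isPrefixOf [','] (c :: rest) = false := by
          simp [List.isPrefixOf]
          exact fun h => hc h.symm
        simp only [hp, Bool.false_eq_true, if_false]
        have := ih rest (c :: cur) acc (by simpa using Nat.le_of_succ_le_succ h)
        simpa [pvFields, hc] using this

theorem splitOn_eq_pvFields (l : List Char) :
    PySem.Chars.splitOn l [','] = pvFields [] l := by
  have := splitOn_go_eq (l.length + 1) l [] [] (by omega)
  simpa [PySem.Chars.splitOn] using this

theorem isIn_at (f : List Char) : PySem.Chars.isIn ['@'] f = f.contains '@' := by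
  have h := PySem.Chars.isIn_iff_infix ['@'] f
  rw [List.singleton_infix_iff] at h
  by_cases hm : '@' ∈ f
  · simp [h.mpr hm, List.contains_eq_mem, hm]
  · have : ¬ PySem.Chars.isIn ['@'] f = true := fun ht => hm (h.mp ht)
    simp only [Bool.not_eq_true] at this
    simp [this, List.contains_eq_mem, hm]

theorem scan_eq (l : List Char) : ∀ (field : List Char),
    emailScan l field (field.contains '@') =
      ((pvFields field l).find? (fun f => f.contains '@')).getD [] := by
  induction l with
  | nil =>
    intro field
    by_cases hm : '@' ∈ field <;>
      simp [emailScan, pvFields, List.find?, List.contains_eq_mem, hm]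
  | cons c rest ih =>
    intro field
    by_cases hc : c = ','
    · subst hc
      by_cases hm : '@' ∈ field
      · simp [emailScan, pvFields, List.contains_eq_mem, hm]
      · have h0 : emailScan rest [] false =
            ((pvFields [] rest).find? (fun f => f.contains '@')).getD [] := ih []
        simpa [emailScan, pvFields, List.find?, List.contains_eq_mem, hm] using h0
    · have hfc : (field ++ [c]).contains '@' = (if c = '@' then true else field.contains '@') := by
        by_cases h : c = '@' <;> simp [List.contains_eq_mem, h] <;> tauto
      have := ih (field ++ [c])
      rw [hfc] at this
      simp only [emailScan, if_neg hc, pvFields, this]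

theorem scan_eq' (l : List Char) :
    emailScan l [] false = ((pvFields [] l).find? (fun f => f.contains '@')).getD [] :=
  scan_eq l []

theorem email_extract_eq (st : String) : email_extract st = email_extract_alt st := by
  simp only [email_extract, email_extract_alt]
  rw [splitOn_eq_pvFields, List.filter_congr (fun f _ => isIn_at f), scan_eq' st.toList]
  have hh : ((pvFields [] st.toList).filter (fun f => f.contains '@')).headD ([] : List Char)
      = ((pvFields [] st.toList).find? (fun f => f.contains '@')).getD [] := by simp
  rw [← hh]
  cases hE : (pvFields [] st.toList).filter (fun f => f.contains '@') with
  | nil => simp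
  | cons x xs => simp

-- ===== VERDICT (by name: the statement is the Claim_ definition above) =====
theorem email_extract_spec : Claim_equal_email_extract := by
  intro st _
  exact email_extract_eq st
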